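-- pv_equiv track=rewrite | github.com/jannikmi/timezonefinder | scripts/utils.py | has_coherent_sequences
-- ===== SOURCE A (Python) =====
-- from typing import Dict, List, Callable
--
-- def has_coherent_sequences(lst: List[int]) -> bool:
--     """
--     :return: True if equal entries in the list are not separated by entries of other values
--     """
--     if len(lst) <= 1:
--         return True
--     encountered = set()
--     # at least 2 entries
--     lst_iter = iter(lst)
--     prev = next(lst_iter)
--     for e in lst:
--         if e in encountered:
--             # the entry appeared earlier already
--             return False
--         if e != prev:
--             encountered.add(prev)
--             prev = e
--
--     return True
-- ===== SOURCE B (Python) =====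
-- def has_coherent_sequences(lst):
--     """True if equal entries form contiguous runs: collapse consecutive
--     duplicates to run representatives, then check all representatives distinct."""
--     collapsed = []
--     for e in lst:
--         if not collapsed or e != collapsed[-1]:
--             collapsed.append(e)
--     return len(collapsed) == len(set(collapsed))
-- ===== Notes on version B (the rewrite author's own statement) =====
-- stated objective: simpler
-- what changed: Replaces the streaming prev/encountered-set early-return scan with a two-phase decomposition: first collapse the list to its run representatives (drop elements equal to their predecessor), then return whether the representatives are pairwise distinct via len(collapsed) == len(set(collapsed)).
import Mathlib
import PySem

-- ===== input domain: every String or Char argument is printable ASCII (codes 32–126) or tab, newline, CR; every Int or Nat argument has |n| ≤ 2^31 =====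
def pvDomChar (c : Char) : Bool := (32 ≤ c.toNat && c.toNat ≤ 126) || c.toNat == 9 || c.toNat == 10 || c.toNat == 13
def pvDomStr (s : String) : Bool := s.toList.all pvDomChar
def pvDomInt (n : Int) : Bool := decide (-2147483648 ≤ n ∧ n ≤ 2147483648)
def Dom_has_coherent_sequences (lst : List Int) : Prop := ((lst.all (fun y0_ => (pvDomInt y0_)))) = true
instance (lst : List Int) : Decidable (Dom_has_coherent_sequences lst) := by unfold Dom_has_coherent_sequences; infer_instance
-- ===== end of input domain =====

-- B collapses the list to run representatives and checks their distinctness, instead of A's streaming prev/seen-set scan; equal return values on every input.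

-- ===== PORT A =====
-- the 'for e in lst' loop with early 'return False'; state = (encountered, prev)
def hcsLoop (encountered : PySem.Set Int) (prev : Int) : List Int → Bool
  | [] => true
  | e :: rest =>
    if PySem.Set.contains encountered e then false
    else if e ≠ prev then hcsLoop (PySem.Set.add encountered prev) e rest
    else hcsLoop encountered prev rest

def has_coherent_sequences (lst : List Int) : Bool :=
  if lst.length ≤ 1 then true
  else
    match lst with
    | [] => true  -- unreachable: length ≥ 2
    | p :: _ => hcsLoop PySem.Set.empty p lst  -- prev = next(iter(lst)); loop over the whole lst

-- ===== PORT B =====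
def has_coherent_sequences_alt (lst : List Int) : Bool :=
  -- phase 1: collapsed = run representatives (append e when collapsed empty or e != collapsed[-1])
  let collapsed := lst.foldl
    (fun c e => if c.isEmpty || e ≠ PySem.List.pyGetD c (-1) 0 then c ++ [e] else c) []
  -- phase 2: len(collapsed) == len(set(collapsed))
  collapsed.length == (PySem.Set.ofList collapsed).length

-- ===== PRECONDITION & SPEC =====
def Spec_has_coherent_sequences (lst : List Int) (out : Bool) : Prop := out = has_coherent_sequences_alt lst
instance (lst : List Int) (out : Bool) : Decidable (Spec_has_coherent_sequences lst out) := by unfold Spec_has_coherent_sequences; infer_instance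

-- ===== CLAIM (what is proved, stated in full; the proofs are below) =====
def Claim_equal_has_coherent_sequences : Prop := ∀ (lst : List Int), Dom_has_coherent_sequences lst → Spec_has_coherent_sequences lst (has_coherent_sequences lst)

-- ===== LEMMAS AND PROOFS =====

-- run representatives after a first element `prev` (proof-side characterisation of B's phase 1)
def cGo (prev : Int) : List Int → List Int
  | [] => []
  | e :: r => if e = prev then cGo prev r else e :: cGo e r

theorem foldl_collapse (l : List Int) : ∀ (c' : List Int) (p : Int),
    l.foldl (fun c e => if c.isEmpty || e ≠ PySem.List.pyGetD c (-1) 0 then c ++ [e] else c) (c' ++ [p])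
      = c' ++ p :: cGo p l := by
  induction l with
  | nil => intro c' p; simp [cGo]
  | cons e r ih =>
    intro c' p
    have hlast : PySem.List.pyGetD (c' ++ [p]) (-1) 0 = p := by simp [pysem]
    simp only [List.foldl_cons]
    rw [hlast]
    by_cases h : e = p
    · rw [if_neg (by simp [h]), ih c' p]
      simp [cGo, h]
    · rw [if_pos (by simp [h]), ih (c' ++ [p]) e]
      simp [cGo, h]

theorem ofList_sublist (c : List Int) : (PySem.Set.ofList c).Sublist c := by
  induction c with
  | nil => simp [PySem.Set.ofList]
  | cons x xs ih =>
    rw [PySem.Set.ofList_cons]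
    refine List.Sublist.cons₂ x ?_
    simp only [PySem.Set.discard]
    exact List.filter_sublist.trans ih

-- invariant of A's loop: it returns true iff the run representatives (with prev) are
-- pairwise distinct and avoid everything already encountered
theorem hcsLoop_iff (l : List Int) : ∀ (enc : PySem.Set Int) (prev : Int), prev ∉ enc →
    (hcsLoop enc prev l = true ↔ ((prev :: cGo prev l).Nodup ∧ ∀ x ∈ cGo prev l, x ∉ enc)) := by
  induction l with
  | nil => intro enc prev _; simp [hcsLoop, cGo]
  | cons e r ih =>
    intro enc prev hp
    by_cases hmem : e ∈ enc
    · have hc : PySem.Set.contains enc e = true := by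
        simpa [pysem] using hmem
      have hne : e ≠ prev := fun h => hp (h ▸ hmem)
      simp only [hcsLoop, hc, if_pos]
      constructor
      · intro h; cases h
      · rintro ⟨_, hall⟩
        exact absurd (hall e (by simp [cGo, hne])) (by simp [hmem])
    · have hc : PySem.Set.contains enc e = false := by
        simpa [pysem] using hmem
      by_cases h : e = prev
      · subst h
        simp only [hcsLoop, hc, Bool.false_eq_true, ne_eq, not_true_eq_false]
        simpa [cGo] using ih enc e hp
      · have hp' : e ∉ PySem.Set.add enc prev := by
          rw [PySem.Set.mem_add]; push_neg; exact ⟨hmem, h⟩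
        simp only [hcsLoop, hc, Bool.false_eq_true, if_neg, ne_eq, h, not_false_eq_true, if_pos]
        rw [ih (PySem.Set.add enc prev) e hp']
        simp only [cGo, if_neg h, List.nodup_cons, List.mem_cons]
        constructor
        · rintro ⟨⟨hne, hnd⟩, hall⟩
          refine ⟨⟨?_, hne, hnd⟩, ?_⟩
          · push_neg
            refine ⟨fun hh => h hh.symm, fun hpc => ?_⟩
            have := hall prev hpc
            rw [PySem.Set.mem_add] at this
            exact this (Or.inr rfl)
          · intro x hx
            rcases hx with rfl | hx
            · exact hmem
            · intro hxe
              exact (hall x hx) (by rw [PySem.Set.mem_add]; exact Or.inl hxe)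
        · rintro ⟨⟨hpn, hne, hnd⟩, hall⟩
          push_neg at hpn
          refine ⟨⟨hne, hnd⟩, ?_⟩
          intro x hx
          rw [PySem.Set.mem_add]
          push_neg
          exact ⟨fun hxe => (hall x (Or.inr hx)) hxe, fun hxp => (hpn.2 (hxp ▸ hx))⟩

theorem nodup_iff_len (c : List Int) : ((PySem.Set.ofList c).length = c.length) ↔ c.Nodup := by
  constructor
  · intro h
    have := (ofList_sublist c).eq_of_length h
    exact this ▸ PySem.Set.nodup_ofList (xs := c)
  · intro h; rw [PySem.Set.ofList_eq_self_of_nodup c h]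

theorem alt_cons (p : Int) (r : List Int) :
    has_coherent_sequences_alt (p :: r) = decide ((p :: cGo p r).Nodup) := by
  simp only [has_coherent_sequences_alt]
  have h0 : ((p :: r).foldl
      (fun c e => if c.isEmpty || e ≠ PySem.List.pyGetD c (-1) 0 then c ++ [e] else c) [])
      = p :: cGo p r := by
    have h1 := foldl_collapse r [] p
    simp only [List.nil_append] at h1
    rw [List.foldl_cons]
    simpa using h1
  rw [h0, Bool.eq_iff_iff]
  simp only [beq_iff_eq, decide_eq_true_eq]
  rw [eq_comm]
  exact nodup_iff_len _

-- ===== VERDICT (by name: the statement is the Claim_ definition above) =====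
theorem has_coherent_sequences_spec : Claim_equal_has_coherent_sequences := by
  intro lst _
  unfold Spec_has_coherent_sequences
  cases lst with
  | nil => rfl
  | cons p r =>
    rw [alt_cons]
    cases r with
    | nil => simp [has_coherent_sequences, cGo]
    | cons q s =>
      have hA : has_coherent_sequences (p :: q :: s) = hcsLoop PySem.Set.empty p (q :: s) := by
        have hct : PySem.Set.contains (PySem.Set.empty (α := Int)) p = false := by simp [pysem]
        simp [has_coherent_sequences, hcsLoop, hct]
      rw [hA, Bool.eq_iff_iff,
        hcsLoop_iff (q :: s) PySem.Set.empty p (by simp [pysem, PySem.Set.empty])]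
      simp [PySem.Set.empty]
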